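-- pv_equiv track=rewrite | github.com/kevinpz/advent-of-code | 2019/08/day08.py | get_picture
-- ===== SOURCE A (Python) =====
-- def get_picture(layer_list, col_nb):
--     picture = ""
--     mapping = {"0": " ", "1": "#"}
--     for pos in range(len(layer_list[0])):
--         if pos % col_nb == 0:
--             picture += "\n"
--         for layer in layer_list:
--             if layer[pos] != "2":
--                 picture += mapping[layer[pos]]
--                 break
--
--     return picture
-- ===== SOURCE B (Python) =====
-- def get_picture(layer_list, col_nb):
--     mapping = {"0": " ", "1": "#"}
--     n = len(layer_list[0])
--     # composite bottom-to-top: upper layers overwrite the buffer wherever they are opaque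
--     resolved = ["2"] * n
--     for layer in reversed(layer_list):
--         for i in range(n):
--             if layer[i] != "2":
--                 resolved[i] = layer[i]
--     return "".join(
--         "\n" + "".join(mapping[c] for c in resolved[i:i + col_nb] if c != "2")
--         for i in range(0, n, col_nb))
-- ===== Notes on version B (the rewrite author's own statement) =====
-- stated objective: alternative
-- what changed: B replaces A's per-pixel scan through the layers (inner break-loop at each position) with bottom-to-top compositing: iterate over whole layers in reverse, overlaying each onto an in-place resolved pixel buffer where non-'2' characters overwrite, then format rows in a second pass by chunking the buffer into slices of col_nb.
-- outside the precondition, e.g. on get_picture(['12'], -1): A returns '\n#\n', B returns ''; on get_picture(['20', '1'], 1): A returns '\n#\n ', B raises IndexError; on get_picture([''], 0): A returns '', B raises ValueError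
import Mathlib
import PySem

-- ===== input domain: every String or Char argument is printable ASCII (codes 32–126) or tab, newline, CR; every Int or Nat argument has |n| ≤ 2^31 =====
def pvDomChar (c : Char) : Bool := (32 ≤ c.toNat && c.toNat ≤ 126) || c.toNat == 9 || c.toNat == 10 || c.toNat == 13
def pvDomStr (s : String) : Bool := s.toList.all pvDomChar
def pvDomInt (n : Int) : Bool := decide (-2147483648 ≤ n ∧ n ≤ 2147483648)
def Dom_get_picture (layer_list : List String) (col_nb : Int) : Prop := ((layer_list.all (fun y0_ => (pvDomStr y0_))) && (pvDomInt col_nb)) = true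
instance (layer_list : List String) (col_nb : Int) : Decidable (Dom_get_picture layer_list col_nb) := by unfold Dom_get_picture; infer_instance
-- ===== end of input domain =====

-- B composites layers bottom-to-top (reversed fold with opaque chars overwriting a pixel buffer) instead of A's per-pixel scan through the layers, then formats rows by chunking; equivalence proved on positive col_nb and well-formed layer data.


-- ===== PORT A =====
-- mapping = {"0": " ", "1": "#"}  (shared by both ports; values as char lists)
def pvMapping : PySem.Dict Char (List Char) := PySem.Dict.ofList [('0', [' ']), ('1', ['#'])]

-- inner 'for layer in layer_list: if layer[pos] != "2": picture += mapping[layer[pos]]; break'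
-- (IndexError / KeyError cases return the accumulator unchanged; they are excluded by Pre_)
def pvInnerA (layer_list : List String) (pos : Int) (picture : List Char) : List Char :=
  match layer_list with
  | [] => picture
  | layer :: rest =>
    match PySem.Str.pyGet? layer pos with
    | none => picture
    | some c =>
      if c ≠ '2' then picture ++ PySem.Dict.getD pvMapping c []
      else pvInnerA rest pos picture

def get_picture (layer_list : List String) (col_nb : Int) : String :=
  String.ofList <|
    (PySem.List.pyRange 0 (PySem.Str.len (PySem.List.pyGetD layer_list 0 "")) 1).foldl
      (fun picture pos =>
        let picture := if PySem.Int.mod pos col_nb = 0 then picture ++ ['\n'] else picture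
        pvInnerA layer_list pos picture)
      []

-- ===== PORT B =====
-- body of the inner loop: if layer[i] != "2": resolved[i] = layer[i]
-- (IndexError case returns the buffer unchanged; it is excluded by Pre_)
def pvStepB (layer : String) (r : List Char) (i : Int) : List Char :=
  match PySem.Str.pyGet? layer i with
  | none => r
  | some c => if c ≠ '2' then r.set i.toNat c else r

-- for i in range(n): if layer[i] != "2": resolved[i] = layer[i]
def pvOverlayB (layer : String) (n : Int) (r : List Char) : List Char :=
  (PySem.List.pyRange 0 n 1).foldl (pvStepB layer) r

-- resolved = ["2"] * n; for layer in reversed(layer_list): <overlay in place>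
def pvResolvedB (layer_list : List String) (n : Int) : List Char :=
  layer_list.reverse.foldl (fun r layer => pvOverlayB layer n r) (List.replicate n.toNat '2')

-- "".join("\n" + "".join(mapping[c] for c in resolved[i:i+col_nb] if c != "2") for i in range(0, n, col_nb))
-- (KeyError cases contribute nothing here; they are excluded by Pre_)
def get_picture_alt (layer_list : List String) (col_nb : Int) : String :=
  let n := PySem.Str.len (PySem.List.pyGetD layer_list 0 "")
  let resolved := pvResolvedB layer_list n
  String.ofList <|
    ((PySem.List.pyRange 0 n col_nb).map
      (fun i => '\n' ::
        ((PySem.List.slice resolved (some i) (some (i + col_nb))).filter (fun c => c ≠ '2')).flatMap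
          (fun c => PySem.Dict.getD pvMapping c []))).flatten

-- ===== PRECONDITION & SPEC =====
-- Pre_ restricts to the natural domain of the task: a positive column width, a nonempty layer list,
-- every layer at least as long as the first, and in every column the topmost non-'2' digit is '0' or '1'
-- (otherwise A raises ZeroDivisionError / IndexError / KeyError, or — for col_nb ≤ 0 and for short
-- layers hidden behind A's break — A returns a value that B cannot match: B then returns '' or raises;
-- see the cited examples); an empty first layer is admitted for every col_nb ≠ 0 (both emit nothing).
def Pre_get_picture (layer_list : List String) (col_nb : Int) : Prop :=
  layer_list ≠ [] ∧
  (((layer_list.headD "").toList.length = 0 ∧ col_nb ≠ 0) ∨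
   (1 ≤ col_nb ∧
    (∀ s ∈ layer_list, (layer_list.headD "").toList.length ≤ s.toList.length) ∧
    (∀ pos : Nat, pos < (layer_list.headD "").toList.length →
      ((layer_list.map (fun s => s.toList.getD pos '2')).find? (fun c => c ≠ '2')).getD '0'
        ∈ (['0', '1'] : List Char))))
instance (layer_list : List String) (col_nb : Int) : Decidable (Pre_get_picture layer_list col_nb) := by
  unfold Pre_get_picture; infer_instance

def pvWitness_get_picture : List String × Int := (["2101", "0012"], 2)

def Spec_get_picture (layer_list : List String) (col_nb : Int) (out : String) : Prop := out = get_picture_alt layer_list col_nb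
instance (layer_list : List String) (col_nb : Int) (out : String) : Decidable (Spec_get_picture layer_list col_nb out) := by unfold Spec_get_picture; infer_instance

-- ===== CLAIM (what is proved, stated in full; the proofs are below) =====
def Claim_equal_get_picture : Prop := ∀ (layer_list : List String) (col_nb : Int), Dom_get_picture layer_list col_nb → Pre_get_picture layer_list col_nb → Spec_get_picture layer_list col_nb (get_picture layer_list col_nb)

-- ===== LEMMAS AND PROOFS =====

-- proof-only: the topmost non-'2' digit of the column at pos ('2' if the whole column is transparent)
def pvFirst (layer_list : List String) (pos : Nat) : Char :=
  ((layer_list.map (fun s => s.toList.getD pos '2')).find? (fun c => c ≠ '2')).getD '2'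

-- proof-only: the characters A appends for position pos
def pvPix (layer_list : List String) (pos : Int) : List Char :=
  if pvFirst layer_list pos.toNat ≠ '2'
  then PySem.Dict.getD pvMapping (pvFirst layer_list pos.toNat) [] else []

-- range with positive step: nil and cons shapes
theorem pvRange_pos_nil (s e c : Int) (hc : 0 < c) (h : e ≤ s) : PySem.List.pyRange s e c = [] := by
  rw [PySem.List.pyRange_of_pos _ _ hc]; simp [show ¬ s < e by omega]

theorem pvRange_pos_cons (s e c : Int) (hc : 0 < c) (h : s < e) :
    PySem.List.pyRange s e c = s :: PySem.List.pyRange (s + c) e c := by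
  rw [PySem.List.pyRange_of_pos _ _ hc, PySem.List.pyRange_of_pos _ _ hc]
  have e1 : e - s + c - 1 = (e - s - 1) + 1 * c := by ring
  have key : (e - s + c - 1) / c = (e - s - 1) / c + 1 := by
    rw [e1, Int.add_mul_ediv_right _ _ (by omega : c ≠ 0)]
  have hq0 : 0 ≤ (e - s - 1) / c := Int.ediv_nonneg (by omega) (by omega)
  by_cases h2 : s + c < e
  · have e2 : e - (s + c) + c - 1 = e - s - 1 := by ring
    rw [if_pos h, if_pos h2, e2, key]
    have ht : ((e - s - 1) / c + 1).toNat = ((e - s - 1) / c).toNat + 1 := by omega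
    rw [ht, List.range_succ_eq_map]
    simp only [List.map_cons, List.map_map]
    congr 1
    · simp
    · refine List.map_congr_left fun k _ => ?_
      simp [Function.comp]
      ring
  · have hz : (e - s - 1) / c = 0 := Int.ediv_eq_zero_of_lt (by omega) (by omega)
    rw [if_pos h, if_neg h2, key, hz]
    simp

-- A's inner break-loop appends exactly the pixel of the topmost opaque digit
theorem pvInnerA_eq_pix (layer_list : List String) (p : Nat) (picture : List Char)
    (h : ∀ s ∈ layer_list, p < s.toList.length) :
    pvInnerA layer_list (p : Int) picture = picture ++ pvPix layer_list (p : Int) := by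
  induction layer_list generalizing picture with
  | nil => simp [pvInnerA, pvPix, pvFirst]
  | cons layer rest ih =>
    have hp : p < layer.toList.length := h layer (by simp)
    have hget : PySem.Str.pyGet? layer (p : Int) = some (layer.toList.getD p '2') := by
      rw [PySem.Str.pyGet?_natCast, List.getD_eq_getElem _ _ hp]
      simp
    by_cases h2 : layer.toList.getD p '2' = '2'
    · simp only [pvInnerA, hget, h2, ne_eq, not_true_eq_false, if_false]
      rw [ih picture (fun s hs => h s (List.mem_cons_of_mem _ hs))]
      simp only [pvPix, pvFirst, List.map_cons, List.find?_cons, Int.toNat_natCast]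
      rw [show layer.toList.getD p '2' = '2' from h2]
      simp
    · simp only [pvInnerA, hget, ne_eq, h2, not_false_eq_true, if_true]
      simp only [pvPix, pvFirst, List.map_cons, List.find?_cons, Int.toNat_natCast]
      rw [show decide (layer.toList.getD p '2' ≠ '2') = true by rw [decide_eq_true_eq]; exact h2]
      simp only [Option.getD_some, ne_eq, h2, not_false_eq_true, if_true]

-- the in-place overlay loop: length is preserved and each cell ends as
-- 'layer char if opaque there, else the old cell' (positions ≥ m untouched)
theorem pvOverlayAux (layer : String) (r : List Char) (m : Nat) (hl : m ≤ layer.toList.length) :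
    ((PySem.List.pyRange 0 (m : Int) 1).foldl (pvStepB layer) r).length = r.length ∧
    (∀ p : Nat, p < r.length →
      ((PySem.List.pyRange 0 (m : Int) 1).foldl (pvStepB layer) r).getD p '2'
        = if p < m ∧ layer.toList.getD p '2' ≠ '2' then layer.toList.getD p '2'
          else r.getD p '2') := by
  induction m with
  | zero =>
    rw [show ((0 : Nat) : Int) = 0 by rfl, PySem.List.pyRange_one_eq_nil (le_refl 0), List.foldl_nil]
    exact ⟨rfl, fun p _ => by simp⟩
  | succ m ih =>
    obtain ⟨ih1, ih2⟩ := ih (by omega)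
    have hcast : ((m + 1 : Nat) : Int) = (m : Int) + 1 := by push_cast; ring
    rw [hcast, PySem.List.pyRange_one_succ_right (by positivity), List.foldl_append,
      List.foldl_cons, List.foldl_nil]
    have hm : m < layer.toList.length := by omega
    have hget : PySem.Str.pyGet? layer (m : Int) = some (layer.toList.getD m '2') := by
      rw [PySem.Str.pyGet?_natCast, List.getD_eq_getElem _ _ hm]
      simp
    by_cases hc : layer.toList.getD m '2' = '2'
    · simp only [pvStepB, hget, hc, ne_eq, not_true_eq_false, if_false]
      refine ⟨ih1, fun p hp => ?_⟩
      rw [ih2 p hp]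
      by_cases hpm : p = m
      · subst hpm
        rw [if_neg (fun hh => hh.2 hc), if_neg (fun hh => hh.2 hc)]
      · have hiff : p < m + 1 ↔ p < m := by omega
        simp only [hiff]
    · simp only [pvStepB, hget, ne_eq, hc, not_false_eq_true, if_true, Int.toNat_natCast]
      refine ⟨by rw [List.length_set, ih1], fun p hp => ?_⟩
      have hpo : p < ((PySem.List.pyRange 0 (m : Int) 1).foldl (pvStepB layer) r).length := by
        rw [ih1]; exact hp
      by_cases hpm : p = m
      · subst hpm
        rw [List.getD_eq_getElem _ '2' (by rw [List.length_set]; exact hpo),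
          List.getElem_set_self, if_pos ⟨by omega, hc⟩]
      · rw [List.getD_eq_getElem _ '2' (by rw [List.length_set]; exact hpo),
          List.getElem_set_ne (by omega), ← List.getD_eq_getElem _ '2' hpo, ih2 p hp]
        have hiff : p < m + 1 ↔ p < m := by omega
        simp only [hiff]

theorem pvResolvedB_cons (layer : String) (rest : List String) (n : Int) :
    pvResolvedB (layer :: rest) n = pvOverlayB layer n (pvResolvedB rest n) := by
  unfold pvResolvedB
  rw [List.foldl_reverse, List.foldl_reverse]
  rfl

theorem pvResolvedB_length (layer_list : List String) (n : Int) (hn : 0 ≤ n)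
    (h : ∀ s ∈ layer_list, n.toNat ≤ s.toList.length) :
    (pvResolvedB layer_list n).length = n.toNat := by
  obtain ⟨m, rfl⟩ : ∃ m : Nat, n = (m : Int) := ⟨n.toNat, by omega⟩
  simp only [Int.toNat_natCast] at h ⊢
  induction layer_list with
  | nil => simp [pvResolvedB]
  | cons layer rest ih =>
    rw [pvResolvedB_cons, pvOverlayB,
      (pvOverlayAux layer (pvResolvedB rest (m : Int)) m (h layer (by simp))).1,
      ih (fun s hs => h s (List.mem_cons_of_mem _ hs))]

-- the composited buffer holds, at every position, the topmost opaque digit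
theorem pvResolvedB_getD (layer_list : List String) (n : Int) (p : Nat) (hn : 0 ≤ n)
    (hp : p < n.toNat) (h : ∀ s ∈ layer_list, n.toNat ≤ s.toList.length) :
    (pvResolvedB layer_list n).getD p '2' = pvFirst layer_list p := by
  obtain ⟨m, rfl⟩ : ∃ m : Nat, n = (m : Int) := ⟨n.toNat, by omega⟩
  simp only [Int.toNat_natCast] at hp h ⊢
  induction layer_list with
  | nil =>
    simp [pvResolvedB, pvFirst, List.getD_eq_getElem?_getD, hp]
  | cons layer rest ih =>
    have hrest := fun s hs => h s (List.mem_cons_of_mem _ hs)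
    have hlen : (pvResolvedB rest (m : Int)).length = m := by
      have := pvResolvedB_length rest (m : Int) (by positivity) (by simpa using hrest)
      simpa using this
    obtain ⟨_, haux⟩ := pvOverlayAux layer (pvResolvedB rest (m : Int)) m (h layer (by simp))
    rw [pvResolvedB_cons, pvOverlayB, haux p (by rw [hlen]; exact hp), ih hrest]
    simp only [pvFirst, List.map_cons, List.find?_cons]
    by_cases h2 : layer.toList.getD p '2' = '2'
    · rw [if_neg (fun hh => hh.2 h2),
        show decide (layer.toList.getD p '2' ≠ '2') = false from
          decide_eq_false_iff_not.mpr (not_not_intro h2)]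
    · rw [if_pos ⟨hp, h2⟩, show decide (layer.toList.getD p '2' ≠ '2') = true by
        rw [decide_eq_true_eq]; exact h2]
      simp

-- slicing a length-n list is reading off a sub-range of positions
theorem pvSlice_getD (xs : List Char) (n i c : Int) (hn : xs.length = n.toNat)
    (hn0 : 0 ≤ n) (hi : 0 ≤ i) (hc : 0 ≤ c) :
    PySem.List.slice xs (some i) (some (i + c))
      = (PySem.List.pyRange i (min (i + c) n) 1).map (fun pos => xs.getD pos.toNat '2') := by
  obtain ⟨a, rfl⟩ : ∃ a : Nat, i = (a : Int) := ⟨i.toNat, by omega⟩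
  obtain ⟨b, hb⟩ : ∃ b : Nat, ((a : Int) + c) = (b : Int) := ⟨((a : Int) + c).toNat, by omega⟩
  rw [hb, PySem.List.slice_natCast]
  apply List.ext_getElem
  · simp [PySem.List.length_pyRange_one, List.length_take, List.length_drop]
    omega
  · intro k h1 h2
    have hxl : a + k < xs.length := by
      simp only [List.length_map, PySem.List.length_pyRange_one] at h2
      omega
    simp only [List.getElem_take, List.getElem_drop, List.getElem_map]
    rw [PySem.List.getElem_pyRange_one]
    have hk : ((a : Int) + (k : Int)).toNat = a + k := by omega
    rw [hk, List.getD_eq_getElem _ '2' hxl]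

-- filter-then-map over a mapped list is a single conditional flatMap over the positions
theorem pvFilterFlatMap (l : List Int) (g : Int → Char) (h : Char → List Char) :
    ((l.map g).filter (fun c => c ≠ '2')).flatMap h
      = l.flatMap (fun x => if g x ≠ '2' then h (g x) else []) := by
  induction l with
  | nil => simp
  | cons x xs ih =>
    simp only [List.map_cons, List.filter_cons, List.flatMap_cons]
    by_cases hx : g x = '2'
    · rw [if_neg (by simp [hx]), if_neg (by simp [hx]), ih]
      simp
    · rw [if_pos (by simp [hx]), if_pos (by simp [hx]), List.flatMap_cons, ih]

-- range(0, 0, c) is empty for every step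
theorem pvRange_zero_zero (c : Int) : PySem.List.pyRange 0 0 c = [] := by
  unfold PySem.List.pyRange
  split_ifs <;> simp_all

-- the chunking lemma: one pass with a newline at every multiple of c equals row chunks of width c
theorem pvChunk (f : Int → List Char) (c : Int) (hc : 1 ≤ c) :
    ∀ (K : Nat) (s e : Int), (e - s).toNat ≤ K → 0 ≤ s → c ∣ s →
    List.flatMap (fun pos => (if PySem.Int.mod pos c = 0 then ['\n'] else []) ++ f pos) (PySem.List.pyRange s e 1)
      = List.flatMap (fun i => '\n' :: ((PySem.List.pyRange i (min (i + c) e) 1).map f).flatten) (PySem.List.pyRange s e c) := by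
  intro K
  induction K with
  | zero =>
    intro s e hK hs hd
    rw [PySem.List.pyRange_one_eq_nil (by omega),
        pvRange_pos_nil s e c (by omega) (by omega)]
    simp
  | succ K ih =>
    intro s e hK hs hd
    by_cases he : e ≤ s
    · rw [PySem.List.pyRange_one_eq_nil he,
          pvRange_pos_nil s e c (by omega) he]
      simp
    · have hse : s < e := by omega
      set m := min (s + c) e with hm
      rw [PySem.List.pyRange_one_append s m e (by omega) (by omega), List.flatMap_append]
      rw [PySem.List.pyRange_one_cons (show s < m by omega), List.flatMap_cons]
      have hmod0 : PySem.Int.mod s c = 0 := (PySem.Int.mod_eq_zero_iff_dvd s c).mpr hd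
      rw [hmod0]
      have hmid : List.flatMap (fun pos => (if PySem.Int.mod pos c = 0 then ['\n'] else []) ++ f pos)
            (PySem.List.pyRange (s+1) m 1)
          = ((PySem.List.pyRange (s+1) m 1).map f).flatten := by
        rw [List.flatMap_def]
        congr 1
        refine List.map_congr_left fun pos hpos => ?_
        rw [PySem.List.mem_pyRange_one] at hpos
        have : ¬ c ∣ pos := by
          intro ⟨q, hq⟩
          obtain ⟨p, hp⟩ := hd
          have h1 : s = c * p := hp
          have h2 : pos = c * q := hq
          have : c * p < c * q := by omega
          have hpq : p < q := lt_of_mul_lt_mul_left this (by omega)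
          have : c * (p + 1) ≤ c * q := by nlinarith
          have hk : c * (p + 1) = c * p + c := by ring
          omega
        have : ¬ PySem.Int.mod pos c = 0 := fun h => this ((PySem.Int.mod_eq_zero_iff_dvd pos c).mp h)
        simp [this]
      rw [hmid]
      rw [pvRange_pos_cons s e c (by omega) hse, List.flatMap_cons]
      rw [PySem.List.pyRange_one_cons (show s < m by omega)]
      have htail : List.flatMap (fun pos => (if PySem.Int.mod pos c = 0 then ['\n'] else []) ++ f pos)
            (PySem.List.pyRange m e 1)
          = List.flatMap (fun i => '\n' :: ((PySem.List.pyRange i (min (i + c) e) 1).map f).flatten)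
            (PySem.List.pyRange (s + c) e c) := by
        by_cases hlt : s + c < e
        · have hmm : m = s + c := by omega
          rw [hmm]
          exact ih (s + c) e (by omega) (by omega) (dvd_add hd (dvd_refl c))
        · have hmm : m = e := by omega
          rw [hmm, PySem.List.pyRange_one_eq_nil (le_refl e),
            pvRange_pos_nil (s + c) e c (by omega) (by omega)]
          simp
      rw [htail]
      simp [List.append_assoc]

-- ===== VERDICT (by name: the statement is the Claim_ definition above) =====
theorem get_picture_spec : Claim_equal_get_picture := by
  intro ll col _hdom hpre
  obtain ⟨hne, hcases⟩ := hpre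
  obtain ⟨l0, rest, rfl⟩ : ∃ l0 rest, ll = l0 :: rest := by
    cases ll with
    | nil => exact absurd rfl hne
    | cons a b => exact ⟨a, b, rfl⟩
  rcases hcases with ⟨h0, hc0⟩ | ⟨hcol, hlen, _hdig⟩
  · -- empty first layer: both programs emit nothing
    simp only [List.headD_cons] at h0
    have hsl : PySem.Str.len l0 = 0 := by rw [PySem.Str.len_eq]; omega
    unfold Spec_get_picture get_picture get_picture_alt
    simp only [PySem.List.pyGetD_zero_cons, hsl, pvRange_zero_zero,
      PySem.List.pyRange_one_eq_nil (le_refl (0 : Int)), List.foldl_nil, List.map_nil,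
      List.flatten_nil]
  unfold Spec_get_picture get_picture get_picture_alt
  simp only [PySem.List.pyGetD_zero_cons]
  set n := PySem.Str.len l0 with hn
  have hn0 : 0 ≤ n := by rw [hn, PySem.Str.len_eq]; positivity
  have hnval : n.toNat = l0.toList.length := by rw [hn, PySem.Str.len_eq]; omega
  have hnlen : ∀ s ∈ l0 :: rest, n.toNat ≤ s.toList.length := by
    intro s hs
    have := hlen s hs
    simp only [List.headD_cons] at this
    omega
  congr 1
  -- A's fold becomes a flatMap of per-position pixels
  rw [PySem.List.foldl_congr_mem _ _
      (fun picture pos => picture ++ ((if PySem.Int.mod pos col = 0 then ['\n'] else []) ++ pvPix (l0 :: rest) pos)) _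
      (by
        intro pic pos hpos
        rw [PySem.List.mem_pyRange_one] at hpos
        obtain ⟨p, rfl⟩ : ∃ p : Nat, pos = (p : Int) := ⟨pos.toNat, by omega⟩
        have hp : ∀ s ∈ l0 :: rest, p < s.toList.length := by
          intro s hs
          have := hnlen s hs
          omega
        show pvInnerA (l0 :: rest) (p : Int) (if PySem.Int.mod (p : Int) col = 0 then pic ++ ['\n'] else pic) = _
        rw [pvInnerA_eq_pix _ _ _ hp]
        by_cases hm : PySem.Int.mod (p : Int) col = 0 <;> simp [hm])]
  rw [PySem.List.foldl_append_eq_flatMap, List.nil_append]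
  rw [← List.flatMap_def]
  -- B's rows become the same pixels grouped into chunks
  have hBM : List.flatMap (fun i => '\n' ::
        ((PySem.List.slice (pvResolvedB (l0 :: rest) n) (some i) (some (i + col))).filter
          (fun c => c ≠ '2')).flatMap (fun c => PySem.Dict.getD pvMapping c []))
        (PySem.List.pyRange 0 n col)
      = List.flatMap (fun i => '\n' :: ((PySem.List.pyRange i (min (i + col) n) 1).map (pvPix (l0 :: rest))).flatten)
        (PySem.List.pyRange 0 n col) := by
    rw [List.flatMap_def, List.flatMap_def]
    congr 1
    refine List.map_congr_left fun i hi => ?_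
    have hmem := (PySem.List.mem_pyRange_iff_of_pos (by omega : (0:Int) < col) i).mp hi
    have hrl : (pvResolvedB (l0 :: rest) n).length = n.toNat :=
      pvResolvedB_length _ _ hn0 hnlen
    rw [pvSlice_getD _ n i col (by omega) hn0 (by omega) (by omega)]
    rw [pvFilterFlatMap]
    congr 1
    rw [List.flatMap_def]
    congr 1
    refine List.map_congr_left fun pos hpos => ?_
    rw [PySem.List.mem_pyRange_one] at hpos
    have hplt : pos.toNat < n.toNat := by omega
    rw [pvResolvedB_getD _ _ _ hn0 hplt hnlen]
    simp [pvPix]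
  rw [hBM]
  exact pvChunk (pvPix (l0 :: rest)) col hcol n.toNat 0 n (by omega) (le_refl 0) (dvd_zero col)
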